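-- pv_equiv track=rewrite | github.com/mattdonders/hockeygamebot | scripts/milestone_digest.py | _scan_platform_availability
-- ===== SOURCE A (Python) =====
-- from typing import Any, Dict, List, Tuple
--
-- def _scan_platform_availability(entries: List[Dict[str, Any]]) -> Tuple[bool, bool]:
--     """
--     Look across all milestone entries and determine whether we have at least one
--     usable URL for X and/or Bluesky.
--
--     Returns:
--         (has_x, has_bluesky)
--     """
--     has_x = False
--     has_bluesky = False
--
--     for entry in entries:
--         platform_posts: Dict[str, Dict[str, Any]] = entry.get("platform_posts") or {}
--
--         x_post = platform_posts.get("x")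
--         if x_post:
--             x_url = x_post.get("url") or x_post.get("uri")
--             if x_url:
--                 has_x = True
--
--         bsky_post = platform_posts.get("bluesky")
--         if bsky_post:
--             bsky_url = bsky_post.get("url") or bsky_post.get("uri")
--             if bsky_url:
--                 has_bluesky = True
--
--         if has_x and has_bluesky:
--             break
--
--     return has_x, has_bluesky
-- ===== SOURCE B (Python) =====
-- from typing import Any, Dict, List, Tuple
--
-- def _scan_platform_availability(entries: List[Dict[str, Any]]) -> Tuple[bool, bool]:
--     # Aggregate the set of ALL platforms that have a usable URL anywhere,
--     # then answer both questions by set membership.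
--     available = set()
--     for entry in entries:
--         for platform, post in ((entry.get("platform_posts") or {}).items()):
--             if post and (post.get("url") or post.get("uri")):
--                 available.add(platform)
--     return ("x" in available, "bluesky" in available)
-- ===== Notes on version B (the rewrite author's own statement) =====
-- stated objective: alternative
-- what changed: Instead of tracking one boolean flag per hard-coded platform with an early break, B iterates every entry's platform_posts items and aggregates the set of all platforms that have a usable url-or-uri, then answers both questions by set membership at the end.
import Mathlib
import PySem

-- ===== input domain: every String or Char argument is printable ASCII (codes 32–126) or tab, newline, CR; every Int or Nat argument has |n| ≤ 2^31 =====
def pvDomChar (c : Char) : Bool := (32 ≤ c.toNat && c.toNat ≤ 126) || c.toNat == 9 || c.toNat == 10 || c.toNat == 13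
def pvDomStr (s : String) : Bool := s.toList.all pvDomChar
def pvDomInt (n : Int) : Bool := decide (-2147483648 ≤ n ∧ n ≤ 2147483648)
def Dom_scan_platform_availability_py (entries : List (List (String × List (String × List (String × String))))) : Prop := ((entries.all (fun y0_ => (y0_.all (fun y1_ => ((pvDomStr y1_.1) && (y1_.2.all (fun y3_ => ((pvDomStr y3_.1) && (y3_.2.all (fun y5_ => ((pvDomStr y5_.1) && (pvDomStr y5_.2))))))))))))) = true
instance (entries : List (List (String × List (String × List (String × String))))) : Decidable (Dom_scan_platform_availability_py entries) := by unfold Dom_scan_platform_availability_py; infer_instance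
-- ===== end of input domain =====

-- B aggregates the set of all platforms with a usable url-or-uri and answers both questions by set membership (alternative decomposition); return value only, no side effects.

-- dict.get(k) on an association-list dictionary (Python dict: duplicate keys collapse, last wins)
def pvGet {β : Type} (d : List (String × β)) (k : String) : Option β :=
  (PySem.Dict.ofList d).get? k

-- Python truthiness of an Optional[str] ('if x_url:' / 'x or y' on str results)
def pvOTruthy : Option String → Bool
  | none => false
  | some s => decide (s ≠ "")

-- ===== PORT A =====
-- the for-loop with its two flags and the 'break' once both are set
def pvA_loop : List (List (String × List (String × List (String × String)))) → Bool → Bool → Bool × Bool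
  | [], has_x, has_bluesky => (has_x, has_bluesky)
  | entry :: rest, has_x, has_bluesky =>
    -- entry.get("platform_posts") or {}   (a falsy Some [] and None both give {})
    let platform_posts := (pvGet entry "platform_posts").getD []
    let has_x :=
      match pvGet platform_posts "x" with
      | some x_post =>
        if x_post ≠ [] then
          let x_url := let u := pvGet x_post "url"
                       if pvOTruthy u then u else pvGet x_post "uri"
          if pvOTruthy x_url then true else has_x
        else has_x
      | none => has_x
    let has_bluesky :=
      match pvGet platform_posts "bluesky" with
      | some bsky_post =>
        if bsky_post ≠ [] then
          let bsky_url := let u := pvGet bsky_post "url"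
                          if pvOTruthy u then u else pvGet bsky_post "uri"
          if pvOTruthy bsky_url then true else has_bluesky
        else has_bluesky
      | none => has_bluesky
    if has_x && has_bluesky then (has_x, has_bluesky)
    else pvA_loop rest has_x has_bluesky

def scan_platform_availability_py (entries : List (List (String × List (String × List (String × String))))) : Bool × Bool :=
  pvA_loop entries false false

-- ===== PORT B =====
-- 'post and (post.get("url") or post.get("uri"))' for one post
def pvUsable (post : List (String × String)) : Bool :=
  decide (post ≠ []) && pvOTruthy (let u := pvGet post "url"
                                   if pvOTruthy u then u else pvGet post "uri")

-- the inner 'for platform, post in (...).items(): if usable: available.add(platform)'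
def pvB_step (avail : PySem.Set String)
    (entry : List (String × List (String × List (String × String)))) : PySem.Set String :=
  ((PySem.Dict.ofList ((pvGet entry "platform_posts").getD [])).items).foldl
    (fun s q => if pvUsable q.2 then PySem.Set.add s q.1 else s) avail

def scan_platform_availability_py_alt (entries : List (List (String × List (String × List (String × String))))) : Bool × Bool :=
  let available := entries.foldl pvB_step PySem.Set.empty
  (PySem.Set.contains available "x", PySem.Set.contains available "bluesky")

-- ===== PRECONDITION & SPEC =====
def Spec_scan_platform_availability_py (entries : List (List (String × List (String × List (String × String))))) (out : Bool × Bool) : Prop := out = scan_platform_availability_py_alt entries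
instance (entries : List (List (String × List (String × List (String × String))))) (out : Bool × Bool) : Decidable (Spec_scan_platform_availability_py entries out) := by unfold Spec_scan_platform_availability_py; infer_instance

-- ===== CLAIM (what is proved, stated in full; the proofs are below) =====
def Claim_equal_scan_platform_availability_py : Prop := ∀ (entries : List (List (String × List (String × List (String × String))))), Dom_scan_platform_availability_py entries → Spec_scan_platform_availability_py entries (scan_platform_availability_py entries)

-- ===== LEMMAS AND PROOFS =====

-- the per-entry availability of platform p, as A reads it off the entry
def pvQ (entry : List (String × List (String × List (String × String)))) (p : String) : Bool :=
  match pvGet ((pvGet entry "platform_posts").getD []) p with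
  | none => false
  | some post => pvUsable post

-- A's per-entry flag update is 'old flag OR pvQ entry p'
theorem pvA_update (old : Bool) (pp : List (String × List (String × String))) (p : String) :
    (match pvGet pp p with
      | some post =>
        if post ≠ [] then
          let url := let u := pvGet post "url"
                     if pvOTruthy u then u else pvGet post "uri"
          if pvOTruthy url then true else old
        else old
      | none => old)
    = (old || (match pvGet pp p with
        | none => false
        | some post => pvUsable post)) := by
  cases h : pvGet pp p with
  | none => simp
  | some post =>
    by_cases hpost : post = []
    · simp [hpost, pvUsable]
    · simp only [hpost, ne_eq, not_false_eq_true, if_true, pvUsable, decide_true, Bool.true_and]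
      cases hu : pvOTruthy (if pvOTruthy (pvGet post "url") then pvGet post "url" else pvGet post "uri") <;>
        simp

theorem pvA_loop_eq (es : List (List (String × List (String × List (String × String))))) :
    ∀ hx hb, pvA_loop es hx hb = (hx || es.any (pvQ · "x"), hb || es.any (pvQ · "bluesky")) := by
  induction es with
  | nil => intro hx hb; simp [pvA_loop]
  | cons e rest ih =>
    intro hx hb
    show (if _ && _ then _ else pvA_loop rest _ _) = _
    rw [pvA_update hx ((pvGet e "platform_posts").getD []) "x",
        pvA_update hb ((pvGet e "platform_posts").getD []) "bluesky"]
    have hq : ∀ p, (match pvGet ((pvGet e "platform_posts").getD []) p with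
        | none => false
        | some post => pvUsable post) = pvQ e p := fun p => rfl
    rw [hq "x", hq "bluesky"]
    by_cases hcond : ((hx || pvQ e "x") && (hb || pvQ e "bluesky")) = true
    · simp only [hcond, if_pos]
      rw [Bool.and_eq_true] at hcond
      simp [List.any_cons, ← Bool.or_assoc, hcond.1, hcond.2]
    · simp only [hcond, if_neg, Bool.not_eq_true] at *
      rw [ih (hx || pvQ e "x") (hb || pvQ e "bluesky")]
      simp [List.any_cons, Bool.or_assoc]

-- membership after the inner items fold
theorem pvB_inner_mem (l : List (String × List (String × String))) (s : PySem.Set String) (p : String) :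
    (p ∈ l.foldl (fun s q => if pvUsable q.2 then PySem.Set.add s q.1 else s) s)
      ↔ p ∈ s ∨ ∃ q ∈ l, q.1 = p ∧ pvUsable q.2 = true := by
  induction l generalizing s with
  | nil => simp
  | cons q rest ih =>
    simp only [List.foldl_cons, ih]
    by_cases hu : pvUsable q.2 = true
    · simp only [hu, if_pos, PySem.Set.mem_add]
      constructor
      · rintro (⟨h | h⟩ | ⟨r, hr, h1, h2⟩)
        · exact Or.inl h
        · exact Or.inr ⟨q, List.mem_cons_self, h.symm, hu⟩
        · exact Or.inr ⟨r, List.mem_cons_of_mem _ hr, h1, h2⟩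
      · rintro (h | ⟨r, hr, h1, h2⟩)
        · exact Or.inl (Or.inl h)
        · rcases List.mem_cons.mp hr with rfl | hr'
          · exact Or.inl (Or.inr h1.symm)
          · exact Or.inr ⟨r, hr', h1, h2⟩
    · rw [Bool.not_eq_true] at hu
      simp only [hu, Bool.false_eq_true, if_false, List.mem_cons]
      constructor
      · rintro (h | ⟨r, hr, h1, h2⟩)
        · exact Or.inl h
        · exact Or.inr ⟨r, Or.inr hr, h1, h2⟩
      · rintro (h | ⟨r, rfl | hr, h1, h2⟩)
        · exact Or.inl h
        · rw [h2] at hu; exact absurd hu (by simp)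
        · exact Or.inr ⟨r, hr, h1, h2⟩
  
-- pvQ in terms of the items of the ofList dictionary
theorem pvQ_iff_items (e : List (String × List (String × List (String × String)))) (p : String) :
    pvQ e p = true ↔
      ∃ q ∈ (PySem.Dict.ofList ((pvGet e "platform_posts").getD [])).items, q.1 = p ∧ pvUsable q.2 = true := by
  unfold pvQ pvGet
  constructor
  · intro h
    cases hg : (PySem.Dict.ofList (((PySem.Dict.ofList e).get? "platform_posts").getD [])).get? p with
    | none => rw [hg] at h; simp at h
    | some post =>
      rw [hg] at h
      exact ⟨(p, post), PySem.Dict.mem_items_of_get?_eq_some _ hg, rfl, h⟩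
  · rintro ⟨⟨k, post⟩, hmem, hk, hu⟩
    subst hk
    rw [PySem.Dict.get?_of_mem_items _ hmem (PySem.Dict.nodup_keys_ofList _)]
    exact hu

-- membership in B's accumulated set
theorem pvB_fold_mem (es : List (List (String × List (String × List (String × String))))) (s : PySem.Set String) (p : String) :
    (p ∈ es.foldl pvB_step s) ↔ p ∈ s ∨ es.any (pvQ · p) = true := by
  induction es generalizing s with
  | nil => simp
  | cons e rest ih =>
    simp only [List.foldl_cons, List.any_cons, ih, pvB_step, pvB_inner_mem, Bool.or_eq_true]
    rw [← pvQ_iff_items]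
    tauto

-- ===== VERDICT (by name: the statement is the Claim_ definition above) =====
theorem scan_platform_availability_py_spec : Claim_equal_scan_platform_availability_py := by
  intro entries _
  show scan_platform_availability_py entries = scan_platform_availability_py_alt entries
  unfold scan_platform_availability_py scan_platform_availability_py_alt
  rw [pvA_loop_eq]
  have h : ∀ p : String,
      PySem.Set.contains (entries.foldl pvB_step PySem.Set.empty) p = entries.any (pvQ · p) := by
    intro p
    rw [Bool.eq_iff_iff]
    rw [show (PySem.Set.contains (entries.foldl pvB_step PySem.Set.empty) p = true)
          ↔ p ∈ entries.foldl pvB_step PySem.Set.empty by simp [PySem.Set.contains]]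
    rw [pvB_fold_mem]
    simp [PySem.Set.empty]
  simp only [h, Bool.false_or]
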